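-- pv_equiv track=rewrite | github.com/ffavela/isonav | isonavScripts/alchemist/binCorComplement.py | getChimAddrFromTelesNum
-- ===== SOURCE A (Python) =====
-- ring_tags = ["1i", "1e", "2i", "2e", "3i", "3e", "4i", "4e", "5i",
--              "5e", "6i", "6e", "7i", "7e", "8i", "8e", "9i", "9e",
--              "S10", "S11", "S12", "S13", "S14", "S15", "S16", "S17",
--              "S18", "S19", "S20", "S21", "S22", "S23", "S24", "S25",
--              "S26"]
--
-- teles_num = [16, 16, 24, 24, 32, 32, 40, 40, 40, 40, 48, 48, 48, 48,
--              48, 48, 48, 48, 32, 32, 32, 32, 32, 32, 32, 32, 32, 32, 32,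
--              32, 32, 32, 32, 16, 8]
--
-- def getChimAddrFromTelesNum(telesNum):
--     myStr = ""
--     mySubTel = 0
--     if not 0 <= telesNum < 1192:
--         return myStr, mySubTel
--     firstVal, nextVal = 0, 0
--     myVal = 0
--
--     for i in range(len(teles_num)):
--         nextVal = firstVal+teles_num[i]
--         if firstVal <= telesNum < nextVal:
--             myStr = ring_tags[i]
--             mySubTel = telesNum-firstVal
--             break
--         myVal += 1
--         firstVal = nextVal
--     return myStr, mySubTel
-- ===== SOURCE B (Python) =====
-- from bisect import bisect_right
-- from itertools import accumulate
--
-- ring_tags = ["1i", "1e", "2i", "2e", "3i", "3e", "4i", "4e", "5i",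
--              "5e", "6i", "6e", "7i", "7e", "8i", "8e", "9i", "9e",
--              "S10", "S11", "S12", "S13", "S14", "S15", "S16", "S17",
--              "S18", "S19", "S20", "S21", "S22", "S23", "S24", "S25",
--              "S26"]
--
-- teles_num = [16, 16, 24, 24, 32, 32, 40, 40, 40, 40, 48, 48, 48, 48,
--              48, 48, 48, 48, 32, 32, 32, 32, 32, 32, 32, 32, 32, 32, 32,
--              32, 32, 32, 32, 16, 8]
--
-- _prefix = list(accumulate(teles_num))
--
-- def getChimAddrFromTelesNum(telesNum):
--     if not 0 <= telesNum < 1192: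
--         return "", 0
--     i = bisect_right(_prefix, telesNum)
--     firstVal = _prefix[i - 1] if i > 0 else 0
--     return ring_tags[i], telesNum - firstVal
-- ===== Notes on version B (the rewrite author's own statement) =====
-- stated objective: idiomatic
-- what changed: Replaces the linear scan that accumulates running bin boundaries with a precomputed prefix-sum table queried by bisect_right (binary search).
import Mathlib
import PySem

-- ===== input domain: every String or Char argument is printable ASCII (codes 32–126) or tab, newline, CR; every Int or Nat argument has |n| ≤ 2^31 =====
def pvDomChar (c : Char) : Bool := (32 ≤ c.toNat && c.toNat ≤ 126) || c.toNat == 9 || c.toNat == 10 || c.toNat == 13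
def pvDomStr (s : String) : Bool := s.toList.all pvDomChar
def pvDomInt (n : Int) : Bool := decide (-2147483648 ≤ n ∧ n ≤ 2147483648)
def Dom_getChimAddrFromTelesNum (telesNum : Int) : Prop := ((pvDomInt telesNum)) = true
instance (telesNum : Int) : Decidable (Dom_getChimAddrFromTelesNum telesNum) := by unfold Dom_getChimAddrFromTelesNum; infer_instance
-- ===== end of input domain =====

-- B replaces A's linear accumulate-and-scan with a precomputed prefix-sum table queried
-- by a bisect_right binary search (more idiomatic; same values everywhere).

def pvRingTags : List String :=
  ["1i", "1e", "2i", "2e", "3i", "3e", "4i", "4e", "5i",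
   "5e", "6i", "6e", "7i", "7e", "8i", "8e", "9i", "9e",
   "S10", "S11", "S12", "S13", "S14", "S15", "S16", "S17",
   "S18", "S19", "S20", "S21", "S22", "S23", "S24", "S25",
   "S26"]

def pvTelesNumTab : List Int :=
  [16, 16, 24, 24, 32, 32, 40, 40, 40, 40, 48, 48, 48, 48,
   48, 48, 48, 48, 32, 32, 32, 32, 32, 32, 32, 32, 32, 32, 32,
   32, 32, 32, 32, 16, 8]

-- ===== PORT A =====
-- A's for-loop with break: state (firstVal, myVal); falls through to ("", 0) (the
-- unchanged myStr/mySubTel) when the loop finishes without break.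
def pvALoop (telesNum : Int) (tab : List Int) (tags : List String) (firstVal myVal : Int) : String × Int :=
  match tab, tags with
  | t :: ts, g :: gs =>
    let nextVal := firstVal + t
    if firstVal ≤ telesNum ∧ telesNum < nextVal then
      (g, telesNum - firstVal)
    else
      pvALoop telesNum ts gs nextVal (myVal + 1)
  | _, _ => ("", 0)

def getChimAddrFromTelesNum (telesNum : Int) : String × Int :=
  if ¬ (0 ≤ telesNum ∧ telesNum < 1192) then ("", 0)
  else pvALoop telesNum pvTelesNumTab pvRingTags 0 0

-- ===== PORT B =====
-- list(accumulate(teles_num)) : running prefix sums (same length as the table)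
def pvPrefix : List Int := ((pvTelesNumTab.scanl (· + ·) 0).tail)

def getChimAddrFromTelesNum_alt (telesNum : Int) : String × Int :=
  if ¬ (0 ≤ telesNum ∧ telesNum < 1192) then ("", 0)
  else
    let i := PySem.List.bisectRight pvPrefix telesNum
    let firstVal := if 0 < i then pvPrefix.getD (i - 1) 0 else 0
    (pvRingTags.getD i "", telesNum - firstVal)

-- ===== PRECONDITION & SPEC =====
def Spec_getChimAddrFromTelesNum (telesNum : Int) (out : String × Int) : Prop := out = getChimAddrFromTelesNum_alt telesNum
instance (telesNum : Int) (out : String × Int) : Decidable (Spec_getChimAddrFromTelesNum telesNum out) := by unfold Spec_getChimAddrFromTelesNum; infer_instance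

-- ===== CLAIM (what is proved, stated in full; the proofs are below) =====
def Claim_equal_getChimAddrFromTelesNum : Prop := ∀ (telesNum : Int), Dom_getChimAddrFromTelesNum telesNum → Spec_getChimAddrFromTelesNum telesNum (getChimAddrFromTelesNum telesNum)

-- ===== LEMMAS AND PROOFS =====
set_option maxHeartbeats 4000000 in
set_option maxRecDepth 100000 in
lemma pv_key : ∀ n : Fin 1192,
    getChimAddrFromTelesNum (n.val : Int) = getChimAddrFromTelesNum_alt (n.val : Int) := by
  decide

-- ===== VERDICT (by name: the statement is the Claim_ definition above) =====
theorem getChimAddrFromTelesNum_spec : Claim_equal_getChimAddrFromTelesNum := by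
  intro t _
  unfold Spec_getChimAddrFromTelesNum
  by_cases h : 0 ≤ t ∧ t < 1192
  · have hn : t = ((⟨t.toNat, by omega⟩ : Fin 1192).val : Int) := by simp; omega
    rw [hn]; exact pv_key _
  · simp only [getChimAddrFromTelesNum, getChimAddrFromTelesNum_alt, h, not_false_iff, if_pos]
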